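-- pv_equiv track=rewrite | github.com/icse2025wasmshield/icse2025wasmshield | wasmshield/preprocessing.py | parse_varint
-- ===== SOURCE A (Python) =====
-- def parse_varint(data, offset ):
--     result = 0
--     shift = 0
--     while True:
--         byte = data[offset]
--         offset += 1
--         result |= (byte & 0x7F) << shift
--         shift += 7
--         if not byte & 0x80:
--             break
--     return result, offset
-- ===== SOURCE B (Python) =====
-- def parse_varint(data, offset):
--     # Collect phase: gather the bytes of the varint (stops after the first
--     # byte whose continuation bit 0x80 is clear).
--     chunk = []
--     while True:
--         byte = data[offset]
--         offset += 1
--         chunk.append(byte)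
--         if not byte & 0x80:
--             break
--     # Fold phase: each byte contributes its low 7 bits at position 7*i.
--     result = sum((b & 0x7F) << (7 * i) for i, b in enumerate(chunk))
--     return result, offset
-- ===== Notes on version B (the rewrite author's own statement) =====
-- stated objective: alternative
-- what changed: B splits A's single interleaved read-and-OR-accumulate loop into a collect phase that only gathers the varint bytes and a separate positional fold result = sum((b & 0x7F) << (7*i)); the equivalence rests on OR of disjoint 7-bit chunks being addition.
import Mathlib
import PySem

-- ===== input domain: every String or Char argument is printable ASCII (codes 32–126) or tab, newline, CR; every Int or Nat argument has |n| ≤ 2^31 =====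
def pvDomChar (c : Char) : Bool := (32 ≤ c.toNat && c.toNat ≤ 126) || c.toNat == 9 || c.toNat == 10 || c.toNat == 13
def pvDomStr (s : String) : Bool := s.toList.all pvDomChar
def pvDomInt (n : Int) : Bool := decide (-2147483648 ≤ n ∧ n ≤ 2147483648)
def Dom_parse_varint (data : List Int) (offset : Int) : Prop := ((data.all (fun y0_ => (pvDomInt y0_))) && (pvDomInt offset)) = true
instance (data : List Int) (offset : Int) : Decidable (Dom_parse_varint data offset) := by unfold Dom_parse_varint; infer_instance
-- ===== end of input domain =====

-- B splits A's interleaved read-and-OR-accumulate loop into a collect phase and a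
-- separate positional-sum fold (OR of disjoint 7-bit chunks = addition); same cost.

-- ===== PORT A =====
-- the 'while True' loop; fuel bounds the iterations (inside Pre_ the loop always
-- returns strictly earlier, so fuel exhaustion is unreachable there)
def pvLoopA (data : List Int) : Nat → Int → Nat → Int → Int × Int
  | 0, result, _shift, offset => (result, offset)
  | fuel + 1, result, shift, offset =>
    match PySem.List.pyGet? data offset with
    | none => (result, offset)  -- IndexError: excluded by Pre_
    | some byte =>
      let offset' := offset + 1
      let result' := PySem.Int.bor result ((PySem.Int.band byte 0x7F) <<< shift)
      let shift' := shift + 7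
      if PySem.Int.band byte 0x80 = 0 then (result', offset')
      else pvLoopA data fuel result' shift' offset'

def parse_varint (data : List Int) (offset : Int) : Int × Int :=
  pvLoopA data (2 * data.length + 1) 0 0 offset

-- ===== PORT B =====
-- collect phase of Source B: read bytes until one has the 0x80 bit clear
def pvCollect (data : List Int) : Nat → Int → List Int → List Int × Int
  | 0, offset, acc => (acc.reverse, offset)
  | fuel + 1, offset, acc =>
    match PySem.List.pyGet? data offset with
    | none => (acc.reverse, offset)  -- IndexError: excluded by Pre_
    | some byte =>
      if PySem.Int.band byte 0x80 = 0 then ((byte :: acc).reverse, offset + 1)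
      else pvCollect data fuel (offset + 1) (byte :: acc)

-- fold phase of Source B: sum((b & 0x7F) << (7*i) for i, b in enumerate(chunk))
def pvSum : List Int → Nat → Int
  | [], _ => 0
  | b :: t, i => (PySem.Int.band b 0x7F) <<< (7 * i) + pvSum t (i + 1)

def parse_varint_alt (data : List Int) (offset : Int) : Int × Int :=
  let r := pvCollect data (2 * data.length + 1) offset []
  (pvSum r.1 0, r.2)

-- ===== PRECONDITION & SPEC =====
-- Pre_ holds exactly where the Python A returns: some byte reached by the scan
-- (which starts at offset, a negative offset reading from the end Python-style)
-- has its 0x80 bit clear before the index runs off the end (else IndexError).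
def Pre_parse_varint (data : List Int) (offset : Int) : Prop :=
  if 0 ≤ offset then
    ((data.drop offset.toNat).any (fun b => PySem.Int.band b 0x80 == 0)) = true
  else
    -(data.length : Int) ≤ offset ∧ (data.any (fun b => PySem.Int.band b 0x80 == 0)) = true
instance (data : List Int) (offset : Int) : Decidable (Pre_parse_varint data offset) := by unfold Pre_parse_varint; infer_instance

def pvWitness_parse_varint : List Int × Int := ([0x85, 0x03], 0)

def Spec_parse_varint (data : List Int) (offset : Int) (out : Int × Int) : Prop := out = parse_varint_alt data offset
instance (data : List Int) (offset : Int) (out : Int × Int) : Decidable (Spec_parse_varint data offset out) := by unfold Spec_parse_varint; infer_instance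

-- ===== CLAIM (what is proved, stated in full; the proofs are below) =====
def Claim_equal_parse_varint : Prop := ∀ (data : List Int) (offset : Int), Dom_parse_varint data offset → Pre_parse_varint data offset → Spec_parse_varint data offset (parse_varint data offset)

-- ===== LEMMAS AND PROOFS =====

-- Int shift-left by a Nat is multiplication by 2^n
theorem pvShl (m : Int) (n : Nat) : m <<< n = m * 2 ^ n := by
  rw [← Int.shiftLeft_natCast_right, Int.shiftLeft_eq_mul_pow]; push_cast; ring

-- b & 0x7F is a 7-bit nonnegative value for every Int b
theorem pvBand127_nonneg (b : Int) : 0 ≤ PySem.Int.band b 0x7F := by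
  simp only [PySem.Int.band]
  split_ifs <;> omega

theorem pvBand127_lt (b : Int) : PySem.Int.band b 0x7F < 128 := by
  have h1 : b.toNat &&& (0x7F : Int).toNat ≤ (0x7F : Int).toNat := Nat.and_le_right
  have h2 : (0x7F : Int).toNat &&& (-b - 1).toNat ≤ (0x7F : Int).toNat := Nat.and_le_left
  simp only [PySem.Int.band]
  split_ifs <;> omega

theorem pvSum_nonneg (t : List Int) (i : Nat) : 0 ≤ pvSum t i := by
  induction t generalizing i with
  | nil => simp [pvSum]
  | cons b t ih =>
    have h1 := pvBand127_nonneg b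
    have h2 := ih (i + 1)
    simp only [pvSum, pvShl]
    positivity

theorem pvSum_shift (t : List Int) (i : Nat) : pvSum t (i + 1) = 128 * pvSum t i := by
  induction t generalizing i with
  | nil => simp [pvSum]
  | cons b t ih =>
    simp only [pvSum, pvShl, ih (i + 1)]
    rw [Nat.mul_add]
    rw [pow_add]
    ring

theorem pvSum_lt (t : List Int) : pvSum t 0 < 2 ^ (7 * t.length) := by
  induction t with
  | nil => simp [pvSum]
  | cons b t ih =>
    have h1 := pvBand127_lt b
    have h2 := pvSum_nonneg t 0
    simp only [pvSum, pvShl, List.length_cons, Nat.mul_zero, pow_zero, mul_one]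
    rw [show (0:Nat) + 1 = 1 from rfl, pvSum_shift t 0]
    have hpow : (2:Int) ^ (7 * (t.length + 1)) = 128 * 2 ^ (7 * t.length) := by
      rw [Nat.mul_add, pow_add]; ring
    rw [hpow]
    have h3 : pvSum t 0 + 1 ≤ 2 ^ (7 * t.length) := ih
    linarith [mul_le_mul_of_nonneg_left h3 (by norm_num : (0:Int) ≤ 128)]

theorem pvSum_append (xs : List Int) (b : Int) (i : Nat) :
    pvSum (xs ++ [b]) i = pvSum xs i + (PySem.Int.band b 0x7F) <<< (7 * (i + xs.length)) := by
  induction xs generalizing i with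
  | nil => simp [pvSum]
  | cons x t ih =>
    simp only [List.cons_append, pvSum, ih (i + 1), List.length_cons]
    have : i + 1 + t.length = i + (t.length + 1) := by omega
    rw [this]
    ring

-- OR of a k-bit nonnegative value with a value shifted past bit k is addition
theorem pvNatOrAdd (k : Nat) : ∀ a b : Nat, a < 2 ^ k → a ||| (b * 2 ^ k) = a + b * 2 ^ k := by
  induction k with
  | zero => intro a b h; interval_cases a; simp
  | succ k ih =>
    intro a b h
    have hbit : Nat.bit (a.testBit 0) (a >>> 1) = a := Nat.bit_testBit_zero_shiftRight_one a
    have hb2 : b * 2 ^ (k + 1) = Nat.bit false (b * 2 ^ k) := by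
      rw [Nat.bit_false_apply]; ring
    have hsh : a >>> 1 = a / 2 := Nat.shiftRight_one a
    have ha2 : a / 2 < 2 ^ k := by
      have : a < 2 * 2 ^ k := by rw [← pow_succ']; exact h
      omega
    calc a ||| b * 2 ^ (k + 1)
        = Nat.bit (a.testBit 0) (a >>> 1) ||| Nat.bit false (b * 2 ^ k) := by rw [hbit, hb2]
      _ = Nat.bit (a.testBit 0 || false) ((a >>> 1) ||| b * 2 ^ k) := Nat.lor_bit _ _ _ _
      _ = Nat.bit (a.testBit 0) ((a / 2) + b * 2 ^ k) := by rw [Bool.or_false, hsh, ih _ _ ha2]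
      _ = a + b * 2 ^ (k + 1) := by
          rw [Nat.bit_val]
          have ht : (a.testBit 0).toNat = a % 2 := by
            rcases Nat.even_or_odd a with he | ho
            · simp [Nat.testBit_zero, Nat.even_iff.mp he]
            · simp [Nat.testBit_zero, Nat.odd_iff.mp ho]
          have hpow : b * 2 ^ (k + 1) = 2 * (b * 2 ^ k) := by ring
          rw [ht, hpow]
          omega

theorem pvOrAdd (a c : Int) (k : Nat) (h0 : 0 ≤ a) (h1 : a < 2 ^ k) (hc : 0 ≤ c) :
    PySem.Int.bor a (c <<< k) = a + c <<< k := by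
  obtain ⟨n, rfl⟩ : ∃ n : Nat, a = (n : Int) := ⟨a.toNat, (Int.toNat_of_nonneg h0).symm⟩
  obtain ⟨m, rfl⟩ : ∃ m : Nat, c = (m : Int) := ⟨c.toNat, (Int.toNat_of_nonneg hc).symm⟩
  have hcast : ((m : Int)) <<< k = ((m * 2 ^ k : Nat) : Int) := by rw [pvShl]; push_cast; ring
  rw [hcast, PySem.Int.bor_natCast]
  have hn : n < 2 ^ k := by exact_mod_cast h1
  rw [pvNatOrAdd k n m hn]
  push_cast; ring

-- A's accumulation step produces exactly the extended chunk's positional sum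
theorem pvStep (xs : List Int) (b : Int) :
    PySem.Int.bor (pvSum xs 0) ((PySem.Int.band b 0x7F) <<< (7 * xs.length)) = pvSum (xs ++ [b]) 0 := by
  rw [pvOrAdd _ _ _ (pvSum_nonneg xs 0) (pvSum_lt xs) (pvBand127_nonneg b)]
  rw [pvSum_append xs b 0]
  simp

-- main invariant: A's loop state (result, shift) mirrors B's collected chunk
theorem pvLoop_collect (data : List Int) : ∀ (fuel : Nat) (offset : Int) (acc : List Int),
    pvLoopA data fuel (pvSum acc.reverse 0) (7 * acc.length) offset
      = (pvSum (pvCollect data fuel offset acc).1 0, (pvCollect data fuel offset acc).2) := by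
  intro fuel
  induction fuel with
  | zero => intro offset acc; simp [pvLoopA, pvCollect]
  | succ fuel ih =>
    intro offset acc
    simp only [pvLoopA, pvCollect]
    cases h : PySem.List.pyGet? data offset with
    | none => simp
    | some byte =>
      simp only []
      have hlen : acc.length = acc.reverse.length := (List.length_reverse).symm
      by_cases hb : PySem.Int.band byte 0x80 = 0
      · simp only [hb, if_true]
        rw [hlen, pvStep acc.reverse byte, ← List.reverse_cons]
      · rw [if_neg hb, if_neg hb]
        have hres : PySem.Int.bor (pvSum acc.reverse 0) ((PySem.Int.band byte 0x7F) <<< (7 * acc.length))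
            = pvSum (byte :: acc).reverse 0 := by
          rw [hlen, pvStep acc.reverse byte, ← List.reverse_cons]
        have hshift : 7 * acc.length + 7 = 7 * (byte :: acc).length := by
          simp [List.length_cons]; ring
        rw [hres, hshift]
        exact ih (offset + 1) (byte :: acc)

-- ===== VERDICT (by name: the statement is the Claim_ definition above) =====
theorem parse_varint_spec : Claim_equal_parse_varint := by
  intro data offset _hdom _hpre
  unfold Spec_parse_varint parse_varint parse_varint_alt
  have h := pvLoop_collect data (2 * data.length + 1) offset []
  simpa [pvSum] using h
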